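-- pv_equiv track=rewrite | github.com/REPBIO-LAB/SVAN | SVAN-DEL.py | search4tsd
-- ===== SOURCE A (Python) =====
-- def search4tsd(targetSeq, insert):
--     '''
--     '''
--     ## Set to upper case to avoid format inconsistencies
--     targetSeq = targetSeq.upper()
--     insert = insert.upper()
--
--     ## Set up parameters
--     nbMM = 0
--     maxMM = 2
--     tsdLen = 0
--
--     ## Pairwise compare
--     for i in range(0, len(targetSeq)):
--         if i >= len(insert):
--             break
--
--         if targetSeq[i] != insert[i]:
--             nbMM += 1
--
--         if nbMM > maxMM:
--             break
--
--         tsdLen += 1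
--
--     ## Discard TSDs equal to the max number of allowed mismatches
--     if tsdLen <= (maxMM + 1):
--         tsdLen = 0
--         tsdSeq = ''
--         insert = insert
--     else:
--         tsdSeq  = insert[0:tsdLen]
--         insert = insert[tsdLen:]
--
--     return tsdSeq, tsdLen, insert
-- ===== SOURCE B (Python) =====
-- def _lcp(t, s, start):
--     # extend a common prefix of t and s starting at position start
--     n = min(len(t), len(s))
--     i = start
--     while i < n and t[i] == s[i]:
--         i += 1
--     return i
--
-- def search4tsd(targetSeq, insert):
--     t = targetSeq.upper()
--     s = insert.upper()
--     L = min(len(t), len(s))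
--     pos = _lcp(t, s, 0)          # first common prefix
--     if pos < L:
--         pos = _lcp(t, s, pos + 1)  # skip one mismatch, extend again
--     if pos < L:
--         pos = _lcp(t, s, pos + 1)  # skip a second mismatch, extend again
--     if pos <= 3:
--         return '', 0, s
--     return s[:pos], pos, s[pos:]
-- ===== Notes on version B (the rewrite author's own statement) =====
-- stated objective: alternative
-- what changed: Replaces A's single scan with a mismatch counter and break conditions by iterated longest-common-prefix extension: compute the common prefix of the uppercased strings, then at most twice skip one mismatching position and extend the common prefix again; the final position is the TSD length.
import Mathlib
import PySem

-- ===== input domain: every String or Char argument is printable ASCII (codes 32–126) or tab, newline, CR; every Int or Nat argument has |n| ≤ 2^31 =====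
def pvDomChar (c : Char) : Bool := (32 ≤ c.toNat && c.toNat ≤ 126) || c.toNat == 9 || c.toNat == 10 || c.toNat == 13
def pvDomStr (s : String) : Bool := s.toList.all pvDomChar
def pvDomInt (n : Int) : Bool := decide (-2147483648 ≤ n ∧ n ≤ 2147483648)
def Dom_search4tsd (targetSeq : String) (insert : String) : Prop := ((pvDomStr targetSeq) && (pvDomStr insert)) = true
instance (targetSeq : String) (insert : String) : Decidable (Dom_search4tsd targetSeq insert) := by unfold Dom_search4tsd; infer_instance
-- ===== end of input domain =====

-- B replaces A's mismatch-counting scan by iterated longest-common-prefix extension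
-- (extend common prefix, skip one mismatch, at most twice); objective: alternative.

-- ===== PORT A =====
-- the 'for i in range(0, len(targetSeq))' loop with its two breaks; nbMM/tsdLen are the Python ints (maxMM = 2)
def search4tsdLoop (t s : List Char) (i : Nat) (nbMM tsdLen : Int) : Int :=
  if h : i < t.length then
    if s.length ≤ i then tsdLen
    else
      let nbMM := if t[i]! ≠ s[i]! then nbMM + 1 else nbMM
      if nbMM > 2 then tsdLen
      else search4tsdLoop t s (i + 1) nbMM (tsdLen + 1)
  else tsdLen
termination_by t.length - i

def search4tsd (targetSeq : String) (insert : String) : String × Int × String :=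
  let targetSeq := PySem.Str.upper targetSeq
  let insert := PySem.Str.upper insert
  let tsdLen := search4tsdLoop targetSeq.toList insert.toList 0 0 0
  if tsdLen ≤ 2 + 1 then ("", 0, insert)                  -- tsdLen <= maxMM + 1
  else (PySem.Str.slice insert (some 0) (some tsdLen), tsdLen,
        PySem.Str.slice insert (some tsdLen) none)

-- ===== PORT B =====
-- _lcp(t, s, start): the 'while i < n and t[i] == s[i]: i += 1' loop
def lcpFrom (t s : List Char) (i : Nat) : Nat :=
  if _h : i < min t.length s.length then
    if t[i]! = s[i]! then lcpFrom t s (i + 1) else i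
  else i
termination_by min t.length s.length - i

def search4tsd_alt (targetSeq : String) (insert : String) : String × Int × String :=
  let t := (PySem.Str.upper targetSeq).toList
  let sStr := PySem.Str.upper insert
  let s := sStr.toList
  let L := min t.length s.length
  let pos0 := lcpFrom t s 0
  let pos1 := if pos0 < L then lcpFrom t s (pos0 + 1) else pos0
  let pos2 := if pos1 < L then lcpFrom t s (pos1 + 1) else pos1
  if (pos2 : Int) ≤ 3 then ("", 0, sStr)
  else (PySem.Str.slice sStr none (some (pos2 : Int)), (pos2 : Int),
        PySem.Str.slice sStr (some (pos2 : Int)) none)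

-- ===== PRECONDITION & SPEC =====
def Spec_search4tsd (targetSeq : String) (insert : String) (out : String × Int × String) : Prop := out = search4tsd_alt targetSeq insert
instance (targetSeq : String) (insert : String) (out : String × Int × String) : Decidable (Spec_search4tsd targetSeq insert out) := by unfold Spec_search4tsd; infer_instance

-- ===== CLAIM (what is proved, stated in full; the proofs are below) =====
def Claim_equal_search4tsd : Prop := ∀ (targetSeq : String) (insert : String), Dom_search4tsd targetSeq insert → Spec_search4tsd targetSeq insert (search4tsd targetSeq insert)

-- ===== LEMMAS AND PROOFS =====
-- 'skip one mismatch and extend' as one step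
def stage (t s : List Char) (p : Nat) : Nat :=
  if p < min t.length s.length then lcpFrom t s (p + 1) else p

-- A's loop with nbMM = 2 stops at the next mismatch (or the end): it is lcpFrom
theorem loop2_eq (t s : List Char) : ∀ (n i : Nat), min t.length s.length - i = n →
    search4tsdLoop t s i 2 (i : Int) = (lcpFrom t s i : Int) := by
  intro n
  induction n with
  | zero =>
    intro i hn
    rw [search4tsdLoop, lcpFrom, dif_neg (by omega : ¬ i < min t.length s.length)]
    by_cases ht : i < t.length
    · rw [dif_pos ht, if_pos (by omega : s.length ≤ i)]
    · rw [dif_neg ht]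
  | succ n ih =>
    intro i hn
    have ht : i < t.length := by omega
    have hs : ¬ s.length ≤ i := by omega
    rw [search4tsdLoop, dif_pos ht, if_neg hs,
        lcpFrom, dif_pos (by omega : i < min t.length s.length)]
    by_cases heq : t[i]! = s[i]!
    · rw [if_neg (not_not_intro heq), if_neg (show ¬ ((2:Int) > 2) by omega), if_pos heq]
      have := ih (i + 1) (by omega)
      simpa using this
    · rw [if_pos heq, if_pos (show ((2:Int) + 1 > 2) by omega), if_neg heq]

-- A's loop with nbMM = 1: extend to the mismatch, skip it, then run with nbMM = 2
theorem loop1_eq (t s : List Char) : ∀ (n i : Nat), min t.length s.length - i = n →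
    search4tsdLoop t s i 1 (i : Int) = (stage t s (lcpFrom t s i) : Int) := by
  intro n
  induction n with
  | zero =>
    intro i hn
    have hl : lcpFrom t s i = i := by
      rw [lcpFrom, dif_neg (by omega : ¬ i < min t.length s.length)]
    rw [hl, stage, if_neg (by omega : ¬ i < min t.length s.length), search4tsdLoop]
    by_cases ht : i < t.length
    · rw [dif_pos ht, if_pos (by omega : s.length ≤ i)]
    · rw [dif_neg ht]
  | succ n ih =>
    intro i hn
    have ht : i < t.length := by omega
    have hs : ¬ s.length ≤ i := by omega
    rw [search4tsdLoop, dif_pos ht, if_neg hs]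
    by_cases heq : t[i]! = s[i]!
    · rw [if_neg (not_not_intro heq), if_neg (show ¬ ((1:Int) > 2) by omega)]
      have hl : lcpFrom t s i = lcpFrom t s (i + 1) := by
        rw [lcpFrom, dif_pos (by omega : i < min t.length s.length), if_pos heq]
      rw [hl]
      have := ih (i + 1) (by omega)
      simpa using this
    · rw [if_pos heq, if_neg (show ¬ ((1:Int) + 1 > 2) by omega)]
      have hl : lcpFrom t s i = i := by
        rw [lcpFrom, dif_pos (by omega : i < min t.length s.length), if_neg heq]
      rw [hl, stage, if_pos (by omega : i < min t.length s.length)]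
      have := loop2_eq t s (min t.length s.length - (i + 1)) (i + 1) rfl
      simpa using this

-- A's loop with nbMM = 0: extend, skip, then run with nbMM = 1
theorem loop0_eq (t s : List Char) : ∀ (n i : Nat), min t.length s.length - i = n →
    search4tsdLoop t s i 0 (i : Int) = (stage t s (stage t s (lcpFrom t s i)) : Int) := by
  intro n
  induction n with
  | zero =>
    intro i hn
    have hl : lcpFrom t s i = i := by
      rw [lcpFrom, dif_neg (by omega : ¬ i < min t.length s.length)]
    have hst : stage t s i = i := by
      rw [stage, if_neg (by omega : ¬ i < min t.length s.length)]
    rw [hl, hst, hst, search4tsdLoop]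
    by_cases ht : i < t.length
    · rw [dif_pos ht, if_pos (by omega : s.length ≤ i)]
    · rw [dif_neg ht]
  | succ n ih =>
    intro i hn
    have ht : i < t.length := by omega
    have hs : ¬ s.length ≤ i := by omega
    rw [search4tsdLoop, dif_pos ht, if_neg hs]
    by_cases heq : t[i]! = s[i]!
    · rw [if_neg (not_not_intro heq), if_neg (show ¬ ((0:Int) > 2) by omega)]
      have hl : lcpFrom t s i = lcpFrom t s (i + 1) := by
        rw [lcpFrom, dif_pos (by omega : i < min t.length s.length), if_pos heq]
      rw [hl]
      have := ih (i + 1) (by omega)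
      simpa using this
    · rw [if_pos heq, if_neg (show ¬ ((0:Int) + 1 > 2) by omega)]
      have hl : lcpFrom t s i = i := by
        rw [lcpFrom, dif_pos (by omega : i < min t.length s.length), if_neg heq]
      have hsi : stage t s i = lcpFrom t s (i + 1) := by
        rw [stage, if_pos (by omega : i < min t.length s.length)]
      rw [hl, hsi]
      have := loop1_eq t s (min t.length s.length - (i + 1)) (i + 1) rfl
      simpa using this

theorem str_slice_zero (s : String) (b : Option Int) :
    PySem.Str.slice s (some 0) b = PySem.Str.slice s none b := by
  simp [PySem.Str.slice]

theorem main_eq (targetSeq insert : String) :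
    search4tsd targetSeq insert = search4tsd_alt targetSeq insert := by
  simp only [search4tsd, search4tsd_alt]
  set t := (PySem.Str.upper targetSeq).toList with ht
  set s := (PySem.Str.upper insert).toList with hs
  have h0 := loop0_eq t s (min t.length s.length) 0 (by omega)
  simp only [Nat.cast_zero] at h0
  rw [h0, str_slice_zero]
  simp only [stage]
  norm_num

-- ===== VERDICT (by name: the statement is the Claim_ definition above) =====
theorem search4tsd_spec : Claim_equal_search4tsd := by
  intro targetSeq insert _
  exact main_eq targetSeq insert
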